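-- pv_equiv track=rewrite | github.com/tomta555/CPE304-Project | Simulation.py | nand
-- ===== SOURCE A (Python) =====
-- def nand(regA, regB):
--     """compute nand from value in regA and regB : input is decimal"""
--     if regA < 0:
--         bi_regA = "{0:b}".format(4294967296+regA)
--     else:
--         bi_regA = "{0:032b}".format(regA)
--     if regB < 0:
--         bi_regB = "{0:b}".format(4294967296+regB)
--     else:
--         bi_regB = "{0:032b}".format(regB)
--     result_and = ""
--     for i in range(0, len(bi_regA), 1):
--         if bi_regA[i] == "1" and bi_regB[i] == "1":
--             result_and += "1"
--         else:
--             result_and += "0"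
--     result = ""
--     for i in range(0, len(result_and), 1):
--         if result_and[i] == "0":
--             result += "1"
--         else:
--             result += "0"
--     count = 0
--     for i in range(0, len(result), 1):
--         if result[i] == "1":
--             count += 1
--     if count == len(result):
--         return -1
--     else:
--         return twos_comp(int(result, 2), 32)
--
-- def twos_comp(val, bits):
--     """compute the 2's complement of int"""
--     if (val & (1 << (bits - 1))) != 0:  # if sign bit is set
--         val = val - (1 << bits)         # compute negative value
--     return val                          # return positive value
-- ===== SOURCE B (Python) =====
-- def twos_comp(val, bits):
--     """compute the 2's complement of int"""
--     if (val & (1 << (bits - 1))) != 0:  # if sign bit is set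
--         val = val - (1 << bits)         # compute negative value
--     return val                          # return positive value
--
--
-- def nand(regA, regB):
--     """compute nand from value in regA and regB : input is decimal"""
--     a = regA % 4294967296
--     b = regB % 4294967296
--     return twos_comp(4294967295 - (a & b), 32)
-- ===== Notes on version B (the rewrite author's own statement) =====
-- stated objective: simpler
-- what changed: Replaces A's binary-string construction and three character-by-character loops (AND, NOT, popcount) by two integer operations: mask both operands to 32 bits and return twos_comp(0xFFFFFFFF - (a & b), 32), which also subsumes A's all-ones special case.
import Mathlib
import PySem

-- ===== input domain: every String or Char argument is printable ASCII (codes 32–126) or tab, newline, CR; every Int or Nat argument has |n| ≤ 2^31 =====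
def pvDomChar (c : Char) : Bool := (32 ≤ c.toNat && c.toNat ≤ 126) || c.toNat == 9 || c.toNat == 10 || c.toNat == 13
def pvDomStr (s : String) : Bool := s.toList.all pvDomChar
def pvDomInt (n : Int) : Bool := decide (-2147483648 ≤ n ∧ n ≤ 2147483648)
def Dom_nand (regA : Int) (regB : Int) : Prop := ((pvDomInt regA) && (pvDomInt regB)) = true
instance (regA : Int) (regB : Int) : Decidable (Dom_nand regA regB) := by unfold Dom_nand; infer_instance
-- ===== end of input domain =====

-- B replaces A's binary-string construction and three character loops by two masking
-- arithmetic operations on integers (simpler, same result on the 32-bit domain).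

-- ===== PORT A =====

-- shared module helper twos_comp (both Pythons call it).
-- '1 << (bits - 1)' / '1 << bits' are ported as 2 ^ (bits-1) / 2 ^ bits: exact for bits ≥ 1 (only called with bits = 32).
def twosComp (val : Int) (bits : Int) : Int :=
  if PySem.Int.band val ((2 : Int) ^ (bits - 1).toNat) ≠ 0 then val - (2 : Int) ^ bits.toNat else val

-- int(result, 2) ported by hand as the base-2 digit fold: 'result' is always a nonempty
-- string of '0'/'1' characters (no sign / space / underscore / prefix), on which CPython's
-- int(s, 2) is exactly this left fold.
def pvParseBin2 (cs : List Char) : Int :=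
  cs.foldl (fun a c => 2 * a + (if c = '1' then 1 else 0)) 0

def nand (regA : Int) (regB : Int) : Int :=
  -- "{0:b}".format(n) = PySem.Int.toBinChars n; "{0:032b}".format(n) ported as zfill to
  -- width 32 of it, exact for the nonnegative n this branch receives.
  let biA : List Char :=
    if regA < 0 then PySem.Int.toBinChars (4294967296 + regA)
    else PySem.Chars.zfill (PySem.Int.toBinChars regA) 32
  let biB : List Char :=
    if regB < 0 then PySem.Int.toBinChars (4294967296 + regB)
    else PySem.Chars.zfill (PySem.Int.toBinChars regB) 32
  -- string indexing s[i] ported via pyGet?; Python's short-circuit 'and' on a raising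
  -- index only differs where len(biB) < len(biA), which no admitted input reaches.
  let resultAnd : List Char :=
    (PySem.List.pyRange 0 (PySem.List.len biA) 1).foldl
      (fun acc i =>
        acc ++ [if PySem.List.pyGet? biA i = some '1' ∧ PySem.List.pyGet? biB i = some '1' then '1' else '0']) []
  let result : List Char :=
    (PySem.List.pyRange 0 (PySem.List.len resultAnd) 1).foldl
      (fun acc i => acc ++ [if PySem.List.pyGet? resultAnd i = some '0' then '1' else '0']) []
  let count : Int :=
    (PySem.List.pyRange 0 (PySem.List.len result) 1).foldl
      (fun c i => if PySem.List.pyGet? result i = some '1' then c + 1 else c) 0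
  if count = PySem.List.len result then -1
  else twosComp (pvParseBin2 result) 32

-- ===== PORT B =====
def nand_alt (regA : Int) (regB : Int) : Int :=
  let a := PySem.Int.mod regA 4294967296
  let b := PySem.Int.mod regB 4294967296
  twosComp (4294967295 - PySem.Int.band a b) 32

-- ===== PRECONDITION & SPEC =====
def Spec_nand (regA : Int) (regB : Int) (out : Int) : Prop := out = nand_alt regA regB
instance (regA : Int) (regB : Int) (out : Int) : Decidable (Spec_nand regA regB out) := by unfold Spec_nand; infer_instance

-- ===== CLAIM (what is proved, stated in full; the proofs are below) =====
def Claim_equal_nand : Prop := ∀ (regA : Int) (regB : Int), Dom_nand regA regB → Spec_nand regA regB (nand regA regB)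

-- ===== LEMMAS AND PROOFS =====

-- the MSB-first k-bit binary expansion of n (proof-side characterisation device)
def bitsRec : Nat → Nat → List Char
  | 0, _ => []
  | k + 1, n => bitsRec k (n / 2) ++ [Nat.digitChar (n % 2)]

-- structural form of Nat.toDigits 2 (what "{0:b}" produces for nonnegative numbers)
def binAux (n : Nat) : List Char :=
  if n < 2 then [Nat.digitChar n] else binAux (n / 2) ++ [Nat.digitChar (n % 2)]
decreasing_by exact Nat.div_lt_self (by omega) (by omega)

theorem toDigitsCore_eq_binAux : ∀ (f n : Nat) (l : List Char), n < f →
    Nat.toDigitsCore 2 f n l = binAux n ++ l := by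
  intro f
  induction f with
  | zero => omega
  | succ f ih =>
    intro n l h
    simp only [Nat.toDigitsCore]
    by_cases h2 : n / 2 = 0
    · have hlt : n < 2 := by omega
      rw [binAux, if_pos hlt]
      simp [h2, Nat.mod_eq_of_lt hlt]
    · rw [if_neg h2, ih (n / 2) (Nat.digitChar (n % 2) :: l) (by omega)]
      conv_rhs => rw [binAux]
      have hge : ¬ n < 2 := by omega
      rw [if_neg hge]
      simp

theorem toDigits_two_eq_binAux (n : Nat) : Nat.toDigits 2 n = binAux n := by
  have := toDigitsCore_eq_binAux (n + 1) n [] (by omega)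
  simpa [Nat.toDigits] using this

theorem length_bitsRec (k n : Nat) : (bitsRec k n).length = k := by
  induction k generalizing n with
  | zero => rfl
  | succ k ih => simp [bitsRec, ih]

theorem bitsRec_zero_val (k : Nat) : bitsRec k 0 = List.replicate k '0' := by
  induction k with
  | zero => rfl
  | succ k ih =>
    rw [bitsRec, List.replicate_succ']
    simp [ih]
    rfl

theorem padBits : ∀ (k n : Nat), 0 < k → n < 2 ^ k →
    List.replicate (k - (binAux n).length) '0' ++ binAux n = bitsRec k n := by
  intro k
  induction k with
  | zero => omega
  | succ k ih =>
    intro n _ hlt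
    by_cases hk : k = 0
    · subst hk
      have hn : n < 2 := by simpa using hlt
      rw [binAux, if_pos hn, bitsRec]
      simp [bitsRec, Nat.mod_eq_of_lt hn]
    by_cases h2 : n < 2
    · rw [binAux, if_pos h2, bitsRec]
      have : n / 2 = 0 := by omega
      rw [this, bitsRec_zero_val, Nat.mod_eq_of_lt h2]
      simp
    · rw [binAux, if_neg h2]
      have hp : 2 ^ (k + 1) = 2 ^ k * 2 := by ring
      have hd : n / 2 < 2 ^ k := by omega
      rw [bitsRec, ← ih (n / 2) (by omega) hd]
      simp only [List.length_append, List.length_cons, List.length_nil]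
      rw [show k + 1 - ((binAux (n / 2)).length + (0 + 1)) = k - (binAux (n / 2)).length by omega]
      simp [List.append_assoc]

theorem binAux_len_lower : ∀ (n k : Nat), 2 ^ k ≤ n → k + 1 ≤ (binAux n).length := by
  intro n
  induction n using Nat.strong_induction_on with
  | _ n ih =>
    intro k hk
    by_cases h2 : n < 2
    · have : k = 0 := by
        by_contra hk0
        have : 2 ^ 1 ≤ 2 ^ k := Nat.pow_le_pow_right (by omega) (by omega)
        omega
      subst this
      rw [binAux, if_pos h2]; simp
    · rw [binAux, if_neg h2]
      simp only [List.length_append, List.length_cons, List.length_nil]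
      cases k with
      | zero =>
        have := ih (n / 2) (Nat.div_lt_self (by omega) (by omega)) 0 (by omega)
        omega
      | succ k =>
        have hp : 2 ^ (k + 1) = 2 ^ k * 2 := by ring
        have := ih (n / 2) (Nat.div_lt_self (by omega) (by omega)) k (by omega)
        omega

theorem binAux_chars : ∀ (n : Nat), ∀ c ∈ binAux n, c = '0' ∨ c = '1' := by
  intro n
  induction n using Nat.strong_induction_on with
  | _ n ih =>
    intro c hc
    by_cases h2 : n < 2
    · rw [binAux, if_pos h2] at hc
      interval_cases n <;> simp_all <;> subst hc <;> simp [Nat.digitChar]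
    · rw [binAux, if_neg h2] at hc
      rcases List.mem_append.mp hc with h | h
      · exact ih (n / 2) (Nat.div_lt_self (by omega) (by omega)) c h
      · have hm : n % 2 = 0 ∨ n % 2 = 1 := by omega
        simp at h
        rcases hm with hm | hm <;> rw [hm] at h <;> subst h <;> simp [Nat.digitChar]

theorem zfill_pad (cs : List Char) (hne : cs ≠ [])
    (h1 : cs.head? ≠ some '+') (h2 : cs.head? ≠ some '-') (w : Nat) :
    PySem.Chars.zfill cs (w : Int) = List.replicate (w - cs.length) '0' ++ cs := by
  rw [PySem.Chars.zfill.eq_def]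
  by_cases hle : (w : Int) ≤ (cs.length : Int)
  · rw [if_pos hle, show w - cs.length = 0 by omega]
    simp
  · rw [if_neg hle]
    match cs, hne with
    | c :: rest, _ =>
      simp only [List.head?] at h1 h2
      simp [show ¬(c = '+' ∨ c = '-') by simp_all]

theorem binAux_ne_nil (n : Nat) : binAux n ≠ [] := by
  rw [binAux]; split <;> simp

theorem binAux_head_ne (n : Nat) (c : Char) (hc : c ≠ '0') (hc1 : c ≠ '1') :
    (binAux n).head? ≠ some c := by
  cases h : binAux n with
  | nil => simp
  | cons d rest =>
    have : d ∈ binAux n := by rw [h]; exact List.mem_cons_self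
    rcases binAux_chars n d this with h0 | h0 <;> subst h0 <;> simp <;>
      exact fun he => (by first | exact hc he.symm | exact hc1 he.symm)

theorem binAux_len_le (n : Nat) (k : Nat) (hk : 0 < k) (h : n < 2 ^ k) : (binAux n).length ≤ k := by
  have := Nat.toDigits_length 2 n k hk h
  rwa [toDigits_two_eq_binAux] at this

theorem operand_bits (x : Int) (h : -2147483648 ≤ x ∧ x ≤ 2147483648) :
    (if x < 0 then PySem.Int.toBinChars (4294967296 + x)
     else PySem.Chars.zfill (PySem.Int.toBinChars x) 32) = bitsRec 32 (x % 4294967296).toNat := by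
  by_cases hx : x < 0
  · rw [if_pos hx]
    rw [PySem.Int.toBinChars, if_neg (by omega)]
    rw [toDigits_two_eq_binAux]
    set m := (4294967296 + x).toNat with hm
    have hmod : (x % 4294967296).toNat = m := by omega
    have hlow : 2 ^ 31 ≤ m := by omega
    have hhi : m < 2 ^ 32 := by omega
    have hlen : (binAux m).length = 32 := by
      have := binAux_len_lower m 31 hlow
      have := binAux_len_le m 32 (by omega) hhi
      omega
    have := padBits 32 m (by omega) hhi
    rw [hlen] at this
    simpa [hmod] using this
  · rw [if_neg hx]
    rw [PySem.Int.toBinChars, if_neg (by omega)]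
    rw [toDigits_two_eq_binAux]
    have hz := zfill_pad (binAux x.toNat) (binAux_ne_nil _)
      (binAux_head_ne _ '+' (by decide) (by decide))
      (binAux_head_ne _ '-' (by decide) (by decide)) 32
    have hmod : (x % 4294967296).toNat = x.toNat := by omega
    have hhi : x.toNat < 2 ^ 32 := by omega
    rw [show ((32 : Nat) : Int) = (32 : Int) by norm_num] at hz
    rw [hz, hmod]
    exact padBits 32 x.toNat (by omega) hhi

theorem foldl_range_index2 {β : Type} :
    ∀ (xs ys : List Char) (f : β → Option Char → Option Char → β) (b : β),
      ys.length = xs.length →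
      (List.range xs.length).foldl (fun acc j => f acc xs[j]? ys[j]?) b
        = (xs.zip ys).foldl (fun acc p => f acc (some p.1) (some p.2)) b := by
  intro xs
  induction xs with
  | nil => simp
  | cons x xs ih =>
    intro ys f b hlen
    match ys with
    | y :: ys =>
      simp only [List.length_cons, List.range_succ_eq_map, List.foldl_cons, List.foldl_map,
        List.getElem?_cons_zero, List.getElem?_cons_succ, List.zip_cons_cons]
      exact ih ys f (f b (some x) (some y)) (by simpa using hlen)

theorem zip_self_foldl {β : Type} (xs : List Char) (f : β → Char → β) (b : β) :
    (xs.zip xs).foldl (fun acc p => f acc p.1) b = xs.foldl f b := by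
  induction xs generalizing b with
  | nil => rfl
  | cons x xs ih => simp [ih]

theorem and_mod_two (a b : Nat) : (a &&& b) % 2 = if a % 2 = 1 ∧ b % 2 = 1 then 1 else 0 := by
  have h := Nat.testBit_land a b 0
  simp only [Nat.testBit_zero] at h
  have h2 := Nat.mod_two_eq_zero_or_one (a &&& b)
  rcases Nat.mod_two_eq_zero_or_one a with ha | ha <;>
    rcases Nat.mod_two_eq_zero_or_one b with hb | hb <;>
    rw [ha, hb] at h <;>
    simp only [show decide ((0:Nat)=1) = false from rfl, Bool.false_and, Bool.and_false,
      decide_eq_false_iff_not] at h <;>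
    simp [ha, hb] <;> omega

theorem andBits : ∀ (k a b : Nat),
    List.zipWith (fun c d => if c = '1' ∧ d = '1' then '1' else '0') (bitsRec k a) (bitsRec k b)
      = bitsRec k (a &&& b) := by
  intro k
  induction k with
  | zero => intro a b; rfl
  | succ k ih =>
    intro a b
    rw [bitsRec, bitsRec, bitsRec,
      List.zipWith_append (by rw [length_bitsRec, length_bitsRec]),
      ih (a / 2) (b / 2), ← Nat.and_div_two]
    congr 1
    rw [and_mod_two]
    rcases Nat.mod_two_eq_zero_or_one a with ha | ha <;>
      rcases Nat.mod_two_eq_zero_or_one b with hb | hb <;>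
      simp [ha, hb, Nat.digitChar]

theorem notBits : ∀ (k m : Nat), m < 2 ^ k →
    (bitsRec k m).map (fun c => if c = '0' then '1' else '0') = bitsRec k (2 ^ k - 1 - m) := by
  intro k
  induction k with
  | zero => intro m _; rfl
  | succ k ih =>
    intro m hm
    have hp : 2 ^ (k + 1) = 2 ^ k * 2 := by ring
    rw [bitsRec, bitsRec, List.map_append, ih (m / 2) (by omega)]
    have hdiv : (2 ^ (k + 1) - 1 - m) / 2 = 2 ^ k - 1 - m / 2 := by omega
    have hmod : (2 ^ (k + 1) - 1 - m) % 2 = 1 - m % 2 := by omega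
    rw [hdiv, hmod]
    congr 1
    rcases Nat.mod_two_eq_zero_or_one m with h | h <;> simp [h, Nat.digitChar]

theorem ones_iff : ∀ (k v : Nat), v < 2 ^ k →
    ((bitsRec k v).countP (· == '1') = k ↔ v = 2 ^ k - 1) := by
  intro k
  induction k with
  | zero => intro v hv; simp [bitsRec]; omega
  | succ k ih =>
    intro v hv
    have hp : 2 ^ (k + 1) = 2 ^ k * 2 := by ring
    rw [bitsRec, List.countP_append]
    have hle : (bitsRec k (v / 2)).countP (· == '1') ≤ k := by
      exact List.countP_le_length.trans_eq (length_bitsRec _ _)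
    have hih := ih (v / 2) (by omega)
    have hlast : (List.countP (· == '1') [Nat.digitChar (v % 2)]) = v % 2 := by
      rcases Nat.mod_two_eq_zero_or_one v with h | h <;> simp [h, Nat.digitChar]
    rw [hlast]
    constructor
    · intro h
      have h1 : (bitsRec k (v / 2)).countP (· == '1') = k ∧ v % 2 = 1 := by omega
      have := hih.mp h1.1
      omega
    · intro h
      have h1 : v / 2 = 2 ^ k - 1 := by omega
      have := hih.mpr h1
      omega

theorem parse_bitsRec : ∀ (k v : Nat), v < 2 ^ k → pvParseBin2 (bitsRec k v) = (v : Int) := by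
  intro k
  induction k with
  | zero => intro v hv; simp [bitsRec, pvParseBin2]; omega
  | succ k ih =>
    intro v hv
    have hp : 2 ^ (k + 1) = 2 ^ k * 2 := by ring
    rw [bitsRec]
    unfold pvParseBin2
    rw [List.foldl_append]
    have := ih (v / 2) (by omega)
    unfold pvParseBin2 at this
    rw [this]
    simp only [List.foldl_cons, List.foldl_nil]
    have : (if Nat.digitChar (v % 2) = '1' then (1 : Int) else 0) = ((v % 2 : Nat) : Int) := by
      rcases Nat.mod_two_eq_zero_or_one v with h | h <;> simp [h, Nat.digitChar]
    rw [this]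
    omega


-- ===== VERDICT (by name: the statement is the Claim_ definition above) =====
theorem nand_spec : Claim_equal_nand := by
  intro regA regB hDom
  simp only [Dom_nand, pvDomInt, Bool.and_eq_true, decide_eq_true_eq] at hDom
  obtain ⟨⟨hA1, hA2⟩, hB1, hB2⟩ := hDom
  show nand regA regB = nand_alt regA regB
  set aN := (regA % 4294967296).toNat with haN
  set bN := (regB % 4294967296).toNat with hbN
  have haNlt : aN < 2 ^ 32 := by omega
  have hbNlt : bN < 2 ^ 32 := by omega
  have hmlt : aN &&& bN < 2 ^ 32 := Nat.and_lt_two_pow _ hbNlt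
  set v := 2 ^ 32 - 1 - (aN &&& bN) with hv
  have hvlt : v < 2 ^ 32 := by omega
  have hRHS : nand_alt regA regB = twosComp ((v : Nat) : Int) 32 := by
    simp only [nand_alt]
    rw [PySem.Int.mod_eq_emod_of_pos (by norm_num), PySem.Int.mod_eq_emod_of_pos (by norm_num)]
    rw [show regA % 4294967296 = (aN : Int) by omega, show regB % 4294967296 = (bN : Int) by omega]
    rw [PySem.Int.band_natCast]
    rw [show (4294967295 : Int) - ((aN &&& bN : Nat) : Int) = ((v : Nat) : Int) by omega]
  simp only [nand]
  rw [operand_bits regA ⟨hA1, hA2⟩, operand_bits regB ⟨hB1, hB2⟩]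
  have h1 : List.foldl
      (fun acc i => acc ++
        [if PySem.List.pyGet? (bitsRec 32 aN) i = some '1' ∧
            PySem.List.pyGet? (bitsRec 32 bN) i = some '1' then '1' else '0'])
      [] (PySem.List.pyRange 0 (PySem.List.len (bitsRec 32 aN)) 1) = bitsRec 32 (aN &&& bN) := by
    rw [PySem.List.len_eq, length_bitsRec, PySem.List.pyRange_zero_natCast, List.foldl_map]
    simp only [PySem.List.pyGet?_natCast]
    have hfold := foldl_range_index2 (bitsRec 32 aN) (bitsRec 32 bN)
      (fun acc o1 o2 => acc ++ [if o1 = some '1' ∧ o2 = some '1' then '1' else '0']) []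
      (by rw [length_bitsRec, length_bitsRec])
    rw [length_bitsRec] at hfold
    beta_reduce at hfold
    rw [hfold, PySem.List.foldl_append_singleton_eq_map, List.nil_append]
    simp only [List.zip_eq_zipWith, List.map_zipWith, Option.some.injEq]
    exact andBits 32 aN bN
  rw [h1]
  have h2 : List.foldl
      (fun acc i => acc ++
        [if PySem.List.pyGet? (bitsRec 32 (aN &&& bN)) i = some '0' then '1' else '0'])
      [] (PySem.List.pyRange 0 (PySem.List.len (bitsRec 32 (aN &&& bN))) 1) = bitsRec 32 v := by
    rw [PySem.List.len_eq, length_bitsRec, PySem.List.pyRange_zero_natCast, List.foldl_map]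
    simp only [PySem.List.pyGet?_natCast]
    have hfold := foldl_range_index2 (bitsRec 32 (aN &&& bN)) (bitsRec 32 (aN &&& bN))
      (fun acc o1 _ => acc ++ [if o1 = some '0' then '1' else '0']) [] rfl
    rw [length_bitsRec] at hfold
    beta_reduce at hfold
    rw [hfold]
    have hself := zip_self_foldl (bitsRec 32 (aN &&& bN))
      (fun acc c => acc ++ [if some c = some '0' then '1' else '0']) []
    beta_reduce at hself
    rw [hself, PySem.List.foldl_append_singleton_eq_map, List.nil_append]
    simp only [Option.some.injEq]
    rw [notBits 32 _ hmlt]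
  rw [h2]
  have h3 : List.foldl
      (fun c i => if PySem.List.pyGet? (bitsRec 32 v) i = some '1' then c + 1 else c)
      0 (PySem.List.pyRange 0 (PySem.List.len (bitsRec 32 v)) 1)
      = ((bitsRec 32 v).countP (· == '1') : Int) := by
    rw [PySem.List.len_eq, length_bitsRec, PySem.List.pyRange_zero_natCast, List.foldl_map]
    simp only [PySem.List.pyGet?_natCast]
    have hfold := foldl_range_index2 (bitsRec 32 v) (bitsRec 32 v)
      (fun (c : Int) o1 _ => if o1 = some '1' then c + 1 else c) (0 : Int) rfl
    rw [length_bitsRec] at hfold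
    beta_reduce at hfold
    rw [hfold]
    have hself := zip_self_foldl (bitsRec 32 v)
      (fun (c : Int) x => if some x = some '1' then c + 1 else c) (0 : Int)
    beta_reduce at hself
    rw [hself]
    rw [show (fun (c : Int) (x : Char) => if some x = some '1' then c + 1 else c)
        = (fun (c : Int) (x : Char) => if (x == '1') = true then c + 1 else c) from by
      funext c x; by_cases h : x = '1' <;> simp [h]]
    rw [PySem.List.foldl_count_if, zero_add]
  rw [h3, PySem.List.len_eq, length_bitsRec]
  rw [hRHS, parse_bitsRec 32 v hvlt]
  by_cases hall : v = 2 ^ 32 - 1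
  · rw [if_pos (by exact_mod_cast (ones_iff 32 v hvlt).mpr hall), hall]
    decide
  · rw [if_neg (by
      intro hc
      exact hall ((ones_iff 32 v hvlt).mp (by exact_mod_cast hc)))]
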